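-- pv_equiv track=rewrite | github.com/thiagofigcosta/http-pyServer | Utils/IntToAlphabetBase.py | intToAlphabet3
-- ===== SOURCE A (Python) =====
-- def intToAlphabet2(number):
-- 	alphabet = 'ABCDEFGHIJKLMNOPQRSTUVWXYZ'
-- 	result = ''
-- 	while number >= len(alphabet):
-- 		result = result +alphabet[len(alphabet)-1]
-- 		number = number-len(alphabet)
-- 	result=result+	alphabet[number]
-- 	return result
--
-- def intToAlphabet3(number,maxsize):
-- 	max=intToAlphabet2(maxsize);
-- 	alphabet = 'ABCDEFGHIJKLMNOPQRSTUVWXYZ'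
-- 	result = ''
-- 	while number >= len(alphabet):
-- 		result = result +alphabet[len(alphabet)-1]
-- 		number = number-len(alphabet)
-- 	result=result+alphabet[number]
-- 	while len(result)<len(max):
-- 		result="A"+result
-- 	return result
-- ===== SOURCE B (Python) =====
-- def intToAlphabet3(number, maxsize):
--     alphabet = 'ABCDEFGHIJKLMNOPQRSTUVWXYZ'
--     width = max(maxsize // 26 + 1, 1)
--     code = 'Z' * (number // 26) + alphabet[number % 26]
--     return 'A' * (width - len(code)) + code
-- ===== Notes on version B (the rewrite author's own statement) =====
-- stated objective: faster
-- what changed: Replaces both character-at-a-time while loops (repeated subtraction of 26 and one-char-per-iteration 'A' padding) by closed-form arithmetic: 'Z'*(n//26)+alphabet[n%26] and one 'A'*(pad) multiplication.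
import Mathlib
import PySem

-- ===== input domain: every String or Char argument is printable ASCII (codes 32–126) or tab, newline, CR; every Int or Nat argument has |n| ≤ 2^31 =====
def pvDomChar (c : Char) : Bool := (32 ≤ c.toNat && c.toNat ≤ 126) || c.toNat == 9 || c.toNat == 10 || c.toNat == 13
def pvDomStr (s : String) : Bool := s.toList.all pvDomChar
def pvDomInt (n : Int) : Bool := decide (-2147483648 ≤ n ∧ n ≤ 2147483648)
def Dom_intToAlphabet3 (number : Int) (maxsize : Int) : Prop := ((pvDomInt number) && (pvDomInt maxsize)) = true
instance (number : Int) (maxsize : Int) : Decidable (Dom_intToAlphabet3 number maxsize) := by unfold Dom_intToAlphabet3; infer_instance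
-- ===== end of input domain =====

-- B replaces A's two character-at-a-time while loops by closed-form arithmetic
-- ('Z'*(n//26) + alphabet[n%26], 'A'*pad); return-value equivalence proved on Pre_.

-- ===== PORT A =====
def pvAlphaA : List Char := "ABCDEFGHIJKLMNOPQRSTUVWXYZ".toList

-- while number >= 26: result += 'Z'; number -= 26; then result += alphabet[number]
-- (pyGet? none = Python IndexError; Pre_ excludes that, .elim [] stands for the raise)
def pvLoopA (n : Int) (res : List Char) : List Char :=
  if 26 ≤ n then pvLoopA (n - 26) (res ++ ['Z'])
  else res ++ ((PySem.List.pyGet? pvAlphaA n).elim [] (fun c => [c]))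
termination_by n.toNat
decreasing_by omega

def pvIntToAlphabet2 (n : Int) : List Char := pvLoopA n []

-- while len(result) < len(max): result = "A" + result
def pvPadA (res : List Char) (t : Nat) : List Char :=
  if res.length < t then pvPadA ('A' :: res) t else res
termination_by t - res.length

def intToAlphabet3 (number : Int) (maxsize : Int) : String :=
  String.ofList (pvPadA (pvLoopA number []) (pvIntToAlphabet2 maxsize).length)

-- ===== PORT B =====
def pvAlphaB : List Char := "ABCDEFGHIJKLMNOPQRSTUVWXYZ".toList

def intToAlphabet3_alt (number : Int) (maxsize : Int) : String :=
  let width : Int := max (PySem.Int.floordiv maxsize 26 + 1) 1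
  let code : List Char :=
    List.replicate (PySem.Int.floordiv number 26).toNat 'Z' ++
      ((PySem.List.pyGet? pvAlphaB (PySem.Int.mod number 26)).elim [] (fun c => [c]))
  String.ofList (List.replicate (width - (code.length : Int)).toNat 'A' ++ code)

-- ===== PRECONDITION & SPEC =====
-- Pre_ excludes exactly the inputs on which A raises IndexError (a negative
-- index past the start of the 26-letter alphabet, i.e. number < -26 or maxsize < -26).
def Pre_intToAlphabet3 (number : Int) (maxsize : Int) : Prop := -26 ≤ number ∧ -26 ≤ maxsize
instance (number : Int) (maxsize : Int) : Decidable (Pre_intToAlphabet3 number maxsize) := by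
  unfold Pre_intToAlphabet3; infer_instance

def pvWitness_intToAlphabet3 : Int × Int := (53, 80)

def Spec_intToAlphabet3 (number : Int) (maxsize : Int) (out : String) : Prop := out = intToAlphabet3_alt number maxsize
instance (number : Int) (maxsize : Int) (out : String) : Decidable (Spec_intToAlphabet3 number maxsize out) := by unfold Spec_intToAlphabet3; infer_instance

-- ===== CLAIM (what is proved, stated in full; the proofs are below) =====
def Claim_equal_intToAlphabet3 : Prop := ∀ (number : Int) (maxsize : Int), Dom_intToAlphabet3 number maxsize → Pre_intToAlphabet3 number maxsize → Spec_intToAlphabet3 number maxsize (intToAlphabet3 number maxsize)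

-- ===== LEMMAS AND PROOFS =====

-- A's first while loop in closed form: (number // 26) copies of 'Z', then alphabet[number % 26].
theorem pvLoopA_eq (n : Int) (res : List Char) (h : -26 ≤ n) :
    pvLoopA n res = res ++ (List.replicate (PySem.Int.floordiv n 26).toNat 'Z'
      ++ ((PySem.List.pyGet? pvAlphaA (PySem.Int.mod n 26)).elim [] (fun c => [c]))) := by
  rw [pvLoopA]
  split
  · rename_i h26
    rw [pvLoopA_eq (n - 26) _ (by omega)]
    have hfd : PySem.Int.floordiv n 26 = PySem.Int.floordiv (n - 26) 26 + 1 := by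
      rw [PySem.Int.floordiv_eq_ediv_of_pos (by norm_num),
          PySem.Int.floordiv_eq_ediv_of_pos (by norm_num)]
      omega
    have hmod : PySem.Int.mod n 26 = PySem.Int.mod (n - 26) 26 := by
      rw [PySem.Int.mod_eq_emod_of_pos (by norm_num),
          PySem.Int.mod_eq_emod_of_pos (by norm_num)]
      omega
    have hfd0 : 0 ≤ PySem.Int.floordiv (n - 26) 26 := by
      rw [PySem.Int.floordiv_eq_ediv_of_pos (by norm_num)]; omega
    rw [hfd, hmod,
        show (PySem.Int.floordiv (n - 26) 26 + 1).toNat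
          = (PySem.Int.floordiv (n - 26) 26).toNat + 1 from by omega]
    simp [List.replicate_succ, List.append_assoc]
  · rename_i h26
    have h0 : (PySem.Int.floordiv n 26).toNat = 0 := by
      rw [PySem.Int.floordiv_eq_ediv_of_pos (by norm_num)]; omega
    rw [h0]
    simp only [List.replicate, List.nil_append]
    have hg : PySem.List.pyGet? pvAlphaA n = PySem.List.pyGet? pvAlphaA (PySem.Int.mod n 26) := by
      interval_cases n <;> decide
    rw [hg]
termination_by n.toNat
decreasing_by omega

-- A's padding loop in closed form.
theorem pvPadA_eq (res : List Char) (t : Nat) :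
    pvPadA res t = List.replicate (t - res.length) 'A' ++ res := by
  rw [pvPadA]
  split
  · rename_i h
    rw [pvPadA_eq ('A' :: res) t,
        show t - res.length = (t - ('A' :: res).length) + 1 from by simp; omega,
        List.replicate_succ']
    simp
  · rename_i h
    rw [show t - res.length = 0 from by omega]
    simp
termination_by t - res.length

-- alphabet[k % 26] always exists.
theorem pvGet_some (k : Int) :
    ∃ c, PySem.List.pyGet? pvAlphaA (PySem.Int.mod k 26) = some c := by
  have h0 : 0 ≤ PySem.Int.mod k 26 := PySem.Int.mod_nonneg k (by norm_num)
  have h1 : PySem.Int.mod k 26 < 26 := PySem.Int.mod_lt k (by norm_num)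
  exact ⟨_, PySem.List.pyGet?_eq_some_getElem (xs := pvAlphaA) h0 (by simpa using h1)⟩

-- ===== VERDICT (by name: the statement is the Claim_ definition above) =====
theorem intToAlphabet3_spec : Claim_equal_intToAlphabet3 := by
  intro n m _ hpre
  obtain ⟨hn, hm⟩ := hpre
  show _ = _
  unfold intToAlphabet3 intToAlphabet3_alt pvIntToAlphabet2
  rw [pvLoopA_eq n [] hn, pvLoopA_eq m [] hm, pvPadA_eq]
  obtain ⟨cn, hcn⟩ := pvGet_some n
  obtain ⟨cm, hcm⟩ := pvGet_some m
  have hAB : pvAlphaB = pvAlphaA := rfl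
  simp only [hAB, hcn, hcm, Option.elim, List.nil_append, List.length_append,
    List.length_replicate, List.length_cons, List.length_nil]
  have hfn : -1 ≤ PySem.Int.floordiv n 26 := by
    rw [PySem.Int.floordiv_eq_ediv_of_pos (by norm_num)]; omega
  have hfm : -1 ≤ PySem.Int.floordiv m 26 := by
    rw [PySem.Int.floordiv_eq_ediv_of_pos (by norm_num)]; omega
  congr 1
  congr 1
  rcases max_cases (PySem.Int.floordiv m 26 + 1) 1 with ⟨he,hle⟩|⟨he,hle⟩ <;> rw [he] <;> congr 1 <;> omega
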